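-- pv_equiv track=rewrite | github.com/Agentic-Environmental-Engineering/GymVerse | gem/gem/envs/RLVE/twiddle_puzzle_env.py | _apply_rotation
-- ===== SOURCE A (Python) =====
-- from typing import Any, Optional, SupportsFloat, Tuple, List
--
-- def _apply_rotation(grid: List[List[int]], i: int, j: int, K: int) -> List[List[int]]:
--     """Apply a 90-degree counterclockwise rotation to the K x K subgrid at (i, j)."""
--     N = len(grid)
--     M = len(grid[0]) if N > 0 else 0
--     new_grid = [grid[row][:] for row in range(N)]
--     for x in range(K):
--         for y in range(K):
--             new_grid[i + K - 1 - y][j + x] = grid[i + x][j + y]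
--     return new_grid
-- ===== SOURCE B (Python) =====
-- def _apply_rotation(grid, i, j, K):
--     """Rotate the K x K subgrid at (i, j) 90 degrees counterclockwise by the
--     classic in-place layer rotation: copy the grid, then peel the window layer
--     by layer, moving four cells at a time along each 4-cycle of the rotation."""
--     new_grid = [row[:] for row in grid]
--     for layer in range(K // 2):
--         first = layer
--         last = K - 1 - layer
--         for t in range(first, last):
--             tmp = new_grid[i + first][j + t]
--             new_grid[i + first][j + t] = new_grid[i + t][j + last]
--             new_grid[i + t][j + last] = new_grid[i + last][j + K - 1 - t]
--             new_grid[i + last][j + K - 1 - t] = new_grid[i + K - 1 - t][j + first]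
--             new_grid[i + K - 1 - t][j + first] = tmp
--     return new_grid
-- ===== Notes on version B (the rewrite author's own statement) =====
-- stated objective: alternative
-- what changed: A builds the result by recomputing every window cell from a source-index map (new[i+K-1-y][j+x] = grid[i+x][j+y]) over a full K x K double loop reading the original grid; B rotates the copied grid in place with the classic layer rotation: it peels the window into concentric rings and, for each ring position, moves four cells at a time along the 4-cycles of the rotation using a single temporary.
-- outside the precondition, e.g. on _apply_rotation([[1, 2]], -1, 0, 2): A returns [[2, 2]], B returns [[1, 2]]
import Mathlib
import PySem

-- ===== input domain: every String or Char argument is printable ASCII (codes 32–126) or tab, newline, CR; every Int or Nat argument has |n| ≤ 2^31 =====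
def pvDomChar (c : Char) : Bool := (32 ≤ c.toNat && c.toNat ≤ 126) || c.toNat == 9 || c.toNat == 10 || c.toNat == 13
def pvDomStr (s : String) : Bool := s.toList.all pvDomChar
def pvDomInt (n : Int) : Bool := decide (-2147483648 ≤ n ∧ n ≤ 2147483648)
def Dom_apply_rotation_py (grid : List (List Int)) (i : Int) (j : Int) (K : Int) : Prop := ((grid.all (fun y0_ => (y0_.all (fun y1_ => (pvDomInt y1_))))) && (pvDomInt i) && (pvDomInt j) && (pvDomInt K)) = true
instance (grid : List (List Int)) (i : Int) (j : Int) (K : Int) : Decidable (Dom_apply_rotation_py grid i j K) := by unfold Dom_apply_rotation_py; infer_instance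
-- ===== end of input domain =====

-- B replaces A's fused index-map copy (new[i+K-1-y][j+x] = grid[i+x][j+y] over the full K×K
-- double loop) with the classic in-place layer rotation on the copied grid: peel the window
-- into concentric rings and move four cells at a time along each 4-cycle with one temporary
-- (objective: alternative; same asymptotic cost).

-- ===== PORT A =====
-- literal transliteration of _apply_rotation
def apply_rotation_py (grid : List (List Int)) (i : Int) (j : Int) (K : Int) : List (List Int) :=
  let N : Int := (grid.length : Int)
  let _M : Int := if N > 0 then ((PySem.List.pyGetD grid 0 []).length : Int) else 0
  let new_grid : List (List Int) :=
    (PySem.List.pyRange 0 N 1).map (fun row => PySem.List.slice (PySem.List.pyGetD grid row []) none none)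
  (PySem.List.pyRange 0 K 1).foldl (fun g x =>
    (PySem.List.pyRange 0 K 1).foldl (fun g y =>
      PySem.List.pySetD g (i + K - 1 - y)
        (PySem.List.pySetD (PySem.List.pyGetD g (i + K - 1 - y) []) (j + x)
          (PySem.List.pyGetD (PySem.List.pyGetD grid (i + x) []) (j + y) 0))) g) new_grid

-- ===== PORT B =====
-- B-side helper: the body of Source B's inner loop (one 4-cycle move with a temporary)
def pyRotCycle (i j K : Int) (g : List (List Int)) (layer t : Int) : List (List Int) :=
  let tmp := PySem.List.pyGetD (PySem.List.pyGetD g (i + layer) []) (j + t) 0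
  let g := PySem.List.pySetD g (i + layer)
    (PySem.List.pySetD (PySem.List.pyGetD g (i + layer) []) (j + t)
      (PySem.List.pyGetD (PySem.List.pyGetD g (i + t) []) (j + (K - 1 - layer)) 0))
  let g := PySem.List.pySetD g (i + t)
    (PySem.List.pySetD (PySem.List.pyGetD g (i + t) []) (j + (K - 1 - layer))
      (PySem.List.pyGetD (PySem.List.pyGetD g (i + (K - 1 - layer)) []) (j + (K - 1 - t)) 0))
  let g := PySem.List.pySetD g (i + (K - 1 - layer))
    (PySem.List.pySetD (PySem.List.pyGetD g (i + (K - 1 - layer)) []) (j + (K - 1 - t))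
      (PySem.List.pyGetD (PySem.List.pyGetD g (i + (K - 1 - t)) []) (j + layer) 0))
  PySem.List.pySetD g (i + (K - 1 - t))
    (PySem.List.pySetD (PySem.List.pyGetD g (i + (K - 1 - t)) []) (j + layer) tmp)

-- literal transliteration of Source B (first = layer, last = K - 1 - layer inlined)
def apply_rotation_py_alt (grid : List (List Int)) (i : Int) (j : Int) (K : Int) : List (List Int) :=
  let new_grid : List (List Int) := grid.map (fun row => PySem.List.slice row none none)
  (PySem.List.pyRange 0 (PySem.Int.floordiv K 2) 1).foldl (fun g layer =>
    (PySem.List.pyRange layer (K - 1 - layer) 1).foldl (fun g t =>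
      pyRotCycle i j K g layer t) g) new_grid

-- ===== PRECONDITION & SPEC =====
-- Pre_ admits every input on which A returns, except the wraparound-collision corners where two
-- distinct window positions alias the same physical cell through Python's negative-index
-- wraparound (rows collide when i < 0 and len(grid) < K; columns collide when a straddling
-- j < 0 < j + K hits a row shorter than K): there the surviving cell values are an accident of
-- the write order, and A's fused loop and B's cycle order leave different residues.
def Pre_apply_rotation_py (grid : List (List Int)) (i : Int) (j : Int) (K : Int) : Prop :=
  K ≤ 0 ∨
    (-(grid.length : Int) ≤ i ∧ i + K ≤ (grid.length : Int) ∧ (0 ≤ i ∨ K ≤ (grid.length : Int)) ∧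
      ∀ x : Nat, x < K.toNat →
        -(((PySem.List.pyGetD grid (i + (x : Int)) []).length : Int)) ≤ j ∧
          j + K ≤ ((PySem.List.pyGetD grid (i + (x : Int)) []).length : Int) ∧
          (0 ≤ j ∨ j + K ≤ 0 ∨ K ≤ ((PySem.List.pyGetD grid (i + (x : Int)) []).length : Int)))
instance (grid : List (List Int)) (i : Int) (j : Int) (K : Int) : Decidable (Pre_apply_rotation_py grid i j K) := by unfold Pre_apply_rotation_py; infer_instance
def pvWitness_apply_rotation_py : List (List Int) × Int × Int × Int := ([[1, 2], [3, 4]], 0, 0, 2)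

def Spec_apply_rotation_py (grid : List (List Int)) (i : Int) (j : Int) (K : Int) (out : List (List Int)) : Prop := out = apply_rotation_py_alt grid i j K
instance (grid : List (List Int)) (i : Int) (j : Int) (K : Int) (out : List (List Int)) : Decidable (Spec_apply_rotation_py grid i j K out) := by unfold Spec_apply_rotation_py; infer_instance

-- ===== CLAIM (what is proved, stated in full; the proofs are below) =====
def Claim_equal_apply_rotation_py : Prop := ∀ (grid : List (List Int)) (i : Int) (j : Int) (K : Int), Dom_apply_rotation_py grid i j K → Pre_apply_rotation_py grid i j K → Spec_apply_rotation_py grid i j K (apply_rotation_py grid i j K)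

-- ===== LEMMAS AND PROOFS =====

-- normalized Nat-index view of one write of the rotation, shared by both ports
def pvWr (N : Nat) (r : Int) : Nat := (if r < 0 then r + N else r).toNat
def pvRow (grid : List (List Int)) (i : Int) (a : Nat) : Nat := pvWr grid.length (i + a)
def pvLen (grid : List (List Int)) (i : Int) (a : Nat) : Nat := (grid.getD (pvRow grid i a) []).length
def pvCol (grid : List (List Int)) (i j : Int) (a b : Nat) : Nat :=
  pvWr (pvLen grid i a) (j + (b : Int))
def pvVal (grid : List (List Int)) (i j : Int) (x y : Nat) : Int :=
  (grid.getD (pvRow grid i x) []).getD (pvCol grid i j x y) 0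
def pvW (grid : List (List Int)) (i j : Int) (n : Nat) (g : List (List Int)) (p : Nat × Nat) : List (List Int) :=
  g.modify (pvRow grid i (n - 1 - p.2)) (fun row => row.set (pvCol grid i j (n - 1 - p.2) p.1) (pvVal grid i j p.1 p.2))
def pvPairs (n : Nat) : List (Nat × Nat) :=
  (List.range n).flatMap (fun x => (List.range n).map (fun y => (x, y)))
-- the cycle structure of B: ring positions and the 4-cycle of logical writes at each position
def pvCycles (n : Nat) : List (Nat × Nat) :=
  (List.range (n / 2)).flatMap (fun l => (List.range' l (n - 1 - 2 * l)).map (fun t => (l, t)))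
def pvCW (n : Nat) (c : Nat × Nat) : List (Nat × Nat) :=
  [(c.2, n - 1 - c.1), (n - 1 - c.1, n - 1 - c.2), (n - 1 - c.2, c.1), (c.1, c.2)]
def pvLb (n : Nat) : List (Nat × Nat) := (pvCycles n).flatMap (pvCW n)

theorem pv_pyIdx_wr (n : Nat) (r : Int) (h1 : -(n : Int) ≤ r) (h2 : r < (n : Int)) :
    PySem.List.pyIdx? n r = some (pvWr n r) := by
  simp only [PySem.List.pyIdx?, pvWr]
  by_cases h : 0 ≤ r
  · rw [if_pos h, if_pos h2, if_neg (by omega)]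
  · rw [if_neg h, if_pos h1, if_pos (by omega)]
    congr 1
    omega

theorem pv_pyGetD_wr {α : Type} (xs : List α) (r : Int) (d : α)
    (h1 : -(xs.length : Int) ≤ r) (h2 : r < (xs.length : Int)) :
    PySem.List.pyGetD xs r d = xs.getD (pvWr xs.length r) d := by
  have hidx := pv_pyIdx_wr xs.length r h1 h2
  simp only [PySem.List.pyGetD, PySem.List.pyGet?, hidx, Option.bind_some, List.getD_eq_getElem?_getD]

theorem pv_pySetD_wr {α : Type} (xs : List α) (r : Int) (v : α)
    (h1 : -(xs.length : Int) ≤ r) (h2 : r < (xs.length : Int)) :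
    PySem.List.pySetD xs r v = xs.set (pvWr xs.length r) v := by
  have hidx := pv_pyIdx_wr xs.length r h1 h2
  simp [PySem.List.pySetD, PySem.List.pySet?, hidx]

theorem pv_foldl_nested_dep {β : Type} (l1 : List Nat) (l2 : Nat → List Nat) (F : β → Nat → Nat → β) (init : β) :
    l1.foldl (fun g x => (l2 x).foldl (fun g y => F g x y) g) init
      = (l1.flatMap (fun x => (l2 x).map (fun y => (x, y)))).foldl (fun g p => F g p.1 p.2) init := by
  induction l1 generalizing init with
  | nil => rfl
  | cons a l ih => simp [List.foldl_append, List.foldl_map, ih]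

theorem pv_foldl_congr_inv {α β : Type} (P : β → Prop) (l : List α) (f f' : β → α → β) (init : β)
    (h0 : P init) (hf : ∀ g x, x ∈ l → P g → f g x = f' g x ∧ P (f' g x)) :
    l.foldl f init = l.foldl f' init := by
  induction l generalizing init with
  | nil => rfl
  | cons a l ih =>
    have h := hf init a (by simp) h0
    simp only [List.foldl_cons, h.1]
    exact ih (f' init a) h.2 (fun g x hx hg => hf g x (by simp [hx]) hg)

theorem pv_shape_modify (g : List (List Int)) (r c : Nat) (v : Int) :
    ((g.modify r (fun row => row.set c v)).map List.length) = g.map List.length := by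
  apply List.ext_getElem (by simp)
  intro t h1 h2
  simp only [List.getElem_map, List.getElem_modify]
  split_ifs <;> simp

theorem pv_mem_pairs (n : Nat) (p : Nat × Nat) : p ∈ pvPairs n ↔ p.1 < n ∧ p.2 < n := by
  cases p with
  | mk a b =>
    simp only [pvPairs, List.mem_flatMap, List.mem_map, List.mem_range]
    constructor
    · rintro ⟨x, hx, y, hy, h⟩
      obtain ⟨rfl, rfl⟩ : x = a ∧ y = b := by
        constructor <;> [exact congrArg Prod.fst h; exact congrArg Prod.snd h]
      exact ⟨hx, hy⟩
    · rintro ⟨h1, h2⟩; exact ⟨a, h1, b, h2, rfl⟩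

theorem pv_nodup_pairs (n : Nat) : (pvPairs n).Nodup := by
  unfold pvPairs
  rw [List.nodup_flatMap]
  constructor
  · intro x _
    exact (List.nodup_range).map (fun a b h => by simpa using congrArg Prod.snd h)
  · apply List.Pairwise.imp_of_mem (l := List.range n) (R := (· ≠ ·))
    · intro a b _ _ hne p hp hq
      simp only [List.mem_map] at hp hq
      obtain ⟨y, _, rfl⟩ := hp
      obtain ⟨y', _, h⟩ := hq
      exact hne (by simpa using congrArg Prod.fst h.symm)
    · exact List.nodup_range.pairwise_of_forall_ne (fun a _ b _ h => h)

-- Pre_ facts in normalized form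
theorem pv_len_bridge (grid : List (List Int)) (i : Int) (a : Nat)
    (h1 : -(grid.length : Int) ≤ i + a) (h2 : i + (a : Int) < grid.length) :
    ((PySem.List.pyGetD grid (i + (a : Int)) []).length : Int) = (pvLen grid i a : Int) := by
  rw [pv_pyGetD_wr grid (i + a) [] h1 h2]; rfl

theorem pv_row_lt (grid : List (List Int)) (i : Int) (a : Nat)
    (h1 : -(grid.length : Int) ≤ i + a) (h2 : i + (a : Int) < grid.length) :
    pvRow grid i a < grid.length := by
  unfold pvRow pvWr; split_ifs <;> omega

theorem pv_row_inj (grid : List (List Int)) (i K : Int)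
    (hi1 : -(grid.length : Int) ≤ i) (hi2 : i + K ≤ (grid.length : Int))
    (hnd : 0 ≤ i ∨ K ≤ (grid.length : Int))
    (a b : Nat) (ha : (a : Int) < K) (hb : (b : Int) < K)
    (h : pvRow grid i a = pvRow grid i b) : a = b := by
  unfold pvRow pvWr at h
  split_ifs at h <;> omega

theorem pv_col_inj (grid : List (List Int)) (i j K : Int) (r : Nat)
    (hL1 : -(pvLen grid i r : Int) ≤ j) (hL2 : j + K ≤ (pvLen grid i r : Int))
    (hL3 : 0 ≤ j ∨ j + K ≤ 0 ∨ K ≤ (pvLen grid i r : Int))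
    (a b : Nat) (ha : (a : Int) < K) (hb : (b : Int) < K)
    (h : pvCol grid i j r a = pvCol grid i j r b) : a = b := by
  unfold pvCol pvWr at h
  split_ifs at h <;> omega

theorem pv_col_lt (grid : List (List Int)) (i j K : Int) (r y : Nat) (hy : (y : Int) < K)
    (hL1 : -(pvLen grid i r : Int) ≤ j) (hL2 : j + K ≤ (pvLen grid i r : Int)) :
    pvCol grid i j r y < pvLen grid i r := by
  unfold pvCol pvWr
  split_ifs <;> omega

theorem pv_shape_len (g grid : List (List Int)) (hshape : g.map List.length = grid.map List.length) :
    g.length = grid.length := by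
  have := congrArg List.length hshape; simpa using this

theorem pv_shape_rowlen (g grid : List (List Int)) (hshape : g.map List.length = grid.map List.length)
    (R : Nat) (hR : R < grid.length) :
    (g.getD R []).length = (grid.getD R []).length := by
  have hg := pv_shape_len g grid hshape
  have := congrArg (fun l => l[R]?) hshape
  simp only [List.getElem?_map] at this
  rw [List.getD_eq_getElem?_getD, List.getD_eq_getElem?_getD,
    List.getElem?_eq_getElem (by omega), List.getElem?_eq_getElem hR]
  have h2 := this
  rw [List.getElem?_eq_getElem (by omega), List.getElem?_eq_getElem hR] at h2
  simpa using h2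

-- reading / writing one Python-indexed cell of a same-shape state, in normalized form
theorem pv_get2 (grid : List (List Int)) (i j K : Int)
    (hi1 : -(grid.length : Int) ≤ i) (hi2 : i + K ≤ (grid.length : Int))
    (hcols : ∀ x : Nat, x < K.toNat →
        -(((PySem.List.pyGetD grid (i + (x : Int)) []).length : Int)) ≤ j ∧
          j + K ≤ ((PySem.List.pyGetD grid (i + (x : Int)) []).length : Int) ∧
          (0 ≤ j ∨ j + K ≤ 0 ∨ K ≤ ((PySem.List.pyGetD grid (i + (x : Int)) []).length : Int)))
    (g : List (List Int)) (hshape : g.map List.length = grid.map List.length)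
    (x y : Nat) (hx : x < K.toNat) (hy : y < K.toNat) :
    PySem.List.pyGetD (PySem.List.pyGetD g (i + (x : Int)) []) (j + (y : Int)) 0
      = (g.getD (pvRow grid i x) []).getD (pvCol grid i j x y) 0 := by
  have hg := pv_shape_len g grid hshape
  have hb1 : -(g.length : Int) ≤ i + x := by omega
  have hb2 : i + (x : Int) < g.length := by omega
  have hR : pvWr g.length (i + x) = pvRow grid i x := by unfold pvRow; rw [hg]
  have hRlt : pvRow grid i x < grid.length := pv_row_lt grid i x (by omega) (by omega)
  have hcol := hcols x hx
  rw [pv_len_bridge grid i x (by omega) (by omega)] at hcol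
  have hrlen : (g.getD (pvRow grid i x) []).length = pvLen grid i x :=
    pv_shape_rowlen g grid hshape (pvRow grid i x) hRlt
  rw [pv_pyGetD_wr g (i + x) [] hb1 hb2, hR,
    pv_pyGetD_wr (g.getD (pvRow grid i x) []) (j + y) 0 (by rw [hrlen]; omega) (by rw [hrlen]; omega),
    hrlen]
  rfl

theorem pv_read (grid : List (List Int)) (i j K : Int)
    (hi1 : -(grid.length : Int) ≤ i) (hi2 : i + K ≤ (grid.length : Int))
    (hcols : ∀ x : Nat, x < K.toNat →
        -(((PySem.List.pyGetD grid (i + (x : Int)) []).length : Int)) ≤ j ∧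
          j + K ≤ ((PySem.List.pyGetD grid (i + (x : Int)) []).length : Int) ∧
          (0 ≤ j ∨ j + K ≤ 0 ∨ K ≤ ((PySem.List.pyGetD grid (i + (x : Int)) []).length : Int)))
    (x y : Nat) (hx : x < K.toNat) (hy : y < K.toNat) :
    PySem.List.pyGetD (PySem.List.pyGetD grid (i + (x : Int)) []) (j + (y : Int)) 0
      = pvVal grid i j x y :=
  pv_get2 grid i j K hi1 hi2 hcols grid rfl x y hx hy

theorem pv_step (grid : List (List Int)) (i j K : Int)
    (hi1 : -(grid.length : Int) ≤ i) (hi2 : i + K ≤ (grid.length : Int))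
    (hcols : ∀ x : Nat, x < K.toNat →
        -(((PySem.List.pyGetD grid (i + (x : Int)) []).length : Int)) ≤ j ∧
          j + K ≤ ((PySem.List.pyGetD grid (i + (x : Int)) []).length : Int) ∧
          (0 ≤ j ∨ j + K ≤ 0 ∨ K ≤ ((PySem.List.pyGetD grid (i + (x : Int)) []).length : Int)))
    (g : List (List Int)) (hshape : g.map List.length = grid.map List.length)
    (a b : Nat) (ha : a < K.toNat) (hb : b < K.toNat) (V : Int) :
    PySem.List.pySetD g (i + (a : Int))
        (PySem.List.pySetD (PySem.List.pyGetD g (i + (a : Int)) []) (j + (b : Int)) V)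
      = g.modify (pvRow grid i a) (fun row => row.set (pvCol grid i j a b) V) := by
  have hg := pv_shape_len g grid hshape
  have hb1 : -(g.length : Int) ≤ i + a := by omega
  have hb2 : i + (a : Int) < g.length := by omega
  have hR : pvWr g.length (i + a) = pvRow grid i a := by unfold pvRow; rw [hg]
  have hRlt : pvRow grid i a < grid.length := pv_row_lt grid i a (by omega) (by omega)
  have hcol := hcols a ha
  rw [pv_len_bridge grid i a (by omega) (by omega)] at hcol
  have hrlen : (g.getD (pvRow grid i a) []).length = pvLen grid i a :=
    pv_shape_rowlen g grid hshape (pvRow grid i a) hRlt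
  rw [pv_pySetD_wr g (i + a) _ hb1 hb2, pv_pyGetD_wr g (i + a) [] hb1 hb2, hR,
    pv_pySetD_wr (g.getD (pvRow grid i a) []) (j + b) V (by rw [hrlen]; omega) (by rw [hrlen]; omega),
    hrlen]
  rw [List.modify_eq_set, List.getD_eq_getElem?_getD]
  rfl

theorem pv_phys_ne (grid : List (List Int)) (i j K : Int)
    (hi1 : -(grid.length : Int) ≤ i) (hi2 : i + K ≤ (grid.length : Int))
    (hi3 : 0 ≤ i ∨ K ≤ (grid.length : Int))
    (hcols : ∀ x : Nat, x < K.toNat →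
        -(((PySem.List.pyGetD grid (i + (x : Int)) []).length : Int)) ≤ j ∧
          j + K ≤ ((PySem.List.pyGetD grid (i + (x : Int)) []).length : Int) ∧
          (0 ≤ j ∨ j + K ≤ 0 ∨ K ≤ ((PySem.List.pyGetD grid (i + (x : Int)) []).length : Int)))
    (a b a' b' : Nat) (ha : a < K.toNat) (hb : b < K.toNat) (ha' : a' < K.toNat) (hb' : b' < K.toNat)
    (hne : (a, b) ≠ (a', b')) :
    pvRow grid i a ≠ pvRow grid i a' ∨ pvCol grid i j a b ≠ pvCol grid i j a' b' := by
  by_cases hr : a = a'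
  · subst hr
    have hbb : b ≠ b' := fun h => hne (by rw [h])
    right
    intro h
    have hcol := hcols a ha
    rw [pv_len_bridge grid i a (by omega) (by omega)] at hcol
    exact hbb (pv_col_inj grid i j K a hcol.1 hcol.2.1 hcol.2.2 b b' (by omega) (by omega) h)
  · left
    intro h
    exact hr (pv_row_inj grid i K hi1 hi2 hi3 a a' (by omega) (by omega) h)

theorem pv_get_modify_ne (g : List (List Int)) (r c : Nat) (v : Int) (r' c' : Nat)
    (h : r' ≠ r ∨ c' ≠ c) :
    (((g.modify r (fun row => row.set c v)).getD r' []).getD c' 0) = ((g.getD r' []).getD c' 0) := by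
  rw [List.getD_eq_getElem?_getD, List.getD_eq_getElem?_getD, List.getElem?_modify]
  by_cases hr : r = r'
  · subst hr
    have hc : c' ≠ c := by tauto
    cases hg : g[r]? with
    | none => simp [hg]
    | some row =>
      simp only [Option.map_eq_map, Option.map_some, Option.getD_some, if_true]
      rw [List.getD_eq_getElem?_getD, List.getD_eq_getElem?_getD,
        List.getElem?_set_ne (Ne.symm hc)]
      simp [hg]
  · simp [hr]

theorem pv_modify_set_self (g : List (List Int)) (r c : Nat) (v : Int)
    (hv : (g.getD r []).getD c 0 = v) (hc : c < (g.getD r []).length) :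
    g.modify r (fun row => row.set c v) = g := by
  apply List.ext_getElem (by simp)
  intro tIdx h1 h2
  simp only [List.getElem_modify]
  split_ifs with h
  · subst h
    have hrow : g.getD r [] = g[r] := by
      rw [List.getD_eq_getElem?_getD, List.getElem?_eq_getElem h2]; rfl
    rw [hrow] at hv hc
    apply List.ext_getElem (by simp)
    intro u hu1 hu2
    rw [List.getElem_set]
    split_ifs with hcu
    · subst hcu
      rw [← hv, List.getD_eq_getElem?_getD, List.getElem?_eq_getElem hu2]; rfl
    · rfl
  · rfl

theorem pv_shape_foldW (grid : List (List Int)) (i j : Int) (n : Nat) :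
    ∀ (L : List (Nat × Nat)) (g : List (List Int)),
      g.map List.length = grid.map List.length →
      (L.foldl (pvW grid i j n) g).map List.length = grid.map List.length := by
  intro L
  induction L with
  | nil => intro g hg; exact hg
  | cons q L ih =>
    intro g hg
    simp only [List.foldl_cons]
    exact ih _ ((pv_shape_modify g _ _ _).trans hg)

theorem pv_foldl_untouched (grid : List (List Int)) (i j : Int) (n : Nat) :
    ∀ (L : List (Nat × Nat)) (g : List (List Int)) (R C : Nat),
      (∀ q ∈ L, pvRow grid i (n - 1 - q.2) ≠ R ∨ pvCol grid i j (n - 1 - q.2) q.1 ≠ C) →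
      (((L.foldl (pvW grid i j n) g).getD R []).getD C 0) = ((g.getD R []).getD C 0) := by
  intro L
  induction L with
  | nil => intro g R C _; rfl
  | cons q L ih =>
    intro g R C hL
    simp only [List.foldl_cons]
    rw [ih _ R C (fun q' hq' => hL q' (by simp [hq']))]
    exact pv_get_modify_ne g _ _ _ R C (by
      have := hL q (by simp)
      tauto)

theorem pv_foldl_id {α β : Type} (f : β → α → β) :
    ∀ (L : List α) (s : β), (∀ q ∈ L, f s q = s) → L.foldl f s = s := by
  intro L
  induction L with
  | nil => intro s _; rfl
  | cons a L ih =>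
    intro s hs
    simp only [List.foldl_cons, hs a (by simp)]
    exact ih s (fun q hq => hs q (by simp [hq]))

-- cycle-structure combinatorics
theorem pv_mem_cycles (n : Nat) (c : Nat × Nat) :
    c ∈ pvCycles n ↔ 2 * c.1 + 1 < n ∧ c.1 ≤ c.2 ∧ c.2 < n - 1 - c.1 := by
  cases c with
  | mk l t =>
    simp only [pvCycles, List.mem_flatMap, List.mem_map, List.mem_range, List.mem_range'_1]
    constructor
    · rintro ⟨x, hx, y, hy, h⟩
      obtain ⟨rfl, rfl⟩ : x = l ∧ y = t := by
        constructor <;> [exact congrArg Prod.fst h; exact congrArg Prod.snd h]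
      refine ⟨by omega, by omega, by omega⟩
    · rintro ⟨h1, h2, h3⟩
      exact ⟨l, by omega, t, by omega, rfl⟩

theorem pv_nodup_cycles (n : Nat) : (pvCycles n).Nodup := by
  unfold pvCycles
  rw [List.nodup_flatMap]
  constructor
  · intro x _
    exact (List.nodup_range').map (fun a b h => by simpa using congrArg Prod.snd h)
  · apply List.Pairwise.imp_of_mem (l := List.range (n / 2)) (R := (· ≠ ·))
    · intro a b _ _ hne p hp hq
      simp only [List.mem_map] at hp hq
      obtain ⟨y, _, rfl⟩ := hp
      obtain ⟨y', _, h⟩ := hq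
      exact hne (by simpa using congrArg Prod.fst h.symm)
    · exact List.nodup_range.pairwise_of_forall_ne (fun a _ b _ h => h)

theorem pv_cw_coords (n : Nat) (c : Nat × Nat) (hc : c ∈ pvCycles n) (p : Nat × Nat)
    (hp : p ∈ pvCW n c) : p.1 < n ∧ p.2 < n := by
  rw [pv_mem_cycles] at hc
  obtain ⟨l, t⟩ := c
  obtain ⟨hc1, hc2, hc3⟩ := hc
  replace hc1 : 2 * l + 1 < n := hc1
  replace hc2 : l ≤ t := hc2
  replace hc3 : t < n - 1 - l := hc3
  simp only [pvCW, List.mem_cons, List.not_mem_nil, or_false] at hp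
  rcases hp with rfl | rfl | rfl | rfl <;> exact ⟨by simp <;> omega, by simp <;> omega⟩

theorem pv_cw_disjoint (n : Nat) (c c' : Nat × Nat) (hc : c ∈ pvCycles n) (hc' : c' ∈ pvCycles n)
    (p : Nat × Nat) (hp : p ∈ pvCW n c) (hq : p ∈ pvCW n c') : c = c' := by
  rw [pv_mem_cycles] at hc hc'
  obtain ⟨l, t⟩ := c
  obtain ⟨l', t'⟩ := c'
  simp only [pvCW, List.mem_cons, List.not_mem_nil, or_false, Prod.ext_iff] at hp hq ⊢
  obtain ⟨hc1, hc2, hc3⟩ := hc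
  obtain ⟨hc1', hc2', hc3'⟩ := hc'
  replace hc1 : 2 * l + 1 < n := hc1
  replace hc2 : l ≤ t := hc2
  replace hc3 : t < n - 1 - l := hc3
  replace hc1' : 2 * l' + 1 < n := hc1'
  replace hc2' : l' ≤ t' := hc2'
  replace hc3' : t' < n - 1 - l' := hc3'
  rcases hp with ⟨h1, h2⟩ | ⟨h1, h2⟩ | ⟨h1, h2⟩ | ⟨h1, h2⟩ <;>
    rcases hq with ⟨h3, h4⟩ | ⟨h3, h4⟩ | ⟨h3, h4⟩ | ⟨h3, h4⟩ <;> omega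

theorem pv_dest_mem_cw (n : Nat) (c : Nat × Nat) (hc : c ∈ pvCycles n) (q : Nat × Nat)
    (hq : q ∈ pvCW n c) : (n - 1 - q.2, q.1) ∈ pvCW n c := by
  rw [pv_mem_cycles] at hc
  obtain ⟨l, t⟩ := c
  obtain ⟨hc1, hc2, hc3⟩ := hc
  replace hc1 : 2 * l + 1 < n := hc1
  replace hc2 : l ≤ t := hc2
  replace hc3 : t < n - 1 - l := hc3
  simp only [pvCW, List.mem_cons, List.not_mem_nil, or_false] at hq
  rcases hq with rfl | rfl | rfl | rfl
  · have e : n - 1 - (n - 1 - l) = l := by omega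
    simp [pvCW, e]
  · have e : n - 1 - (n - 1 - t) = t := by omega
    simp [pvCW, e]
  · simp [pvCW]
  · simp [pvCW]

theorem pv_nodup_Lb (n : Nat) : (pvLb n).Nodup := by
  unfold pvLb
  rw [List.nodup_flatMap]
  constructor
  · intro c hc
    rw [pv_mem_cycles] at hc
    obtain ⟨l, t⟩ := c
    obtain ⟨hc1, hc2, hc3⟩ := hc
    replace hc1 : 2 * l + 1 < n := hc1
    replace hc2 : l ≤ t := hc2
    replace hc3 : t < n - 1 - l := hc3
    show ([(t, n - 1 - l), (n - 1 - l, n - 1 - t), (n - 1 - t, l), (l, t)] : List (Nat × Nat)).Nodup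
    simp only [List.nodup_cons, List.mem_cons, List.not_mem_nil, or_false, List.nodup_nil,
      and_true, Prod.ext_iff, not_or]
    refine ⟨⟨?_, ?_, ?_⟩, ⟨?_, ?_⟩, ?_, fun h => h⟩ <;> omega
  · apply List.Pairwise.imp_of_mem (l := pvCycles n) (R := fun a b => a ∈ pvCycles n ∧ b ∈ pvCycles n ∧ a ≠ b)
    · rintro a b _ _ ⟨ha, hb, hne⟩ p hp hq
      exact hne (pv_cw_disjoint n a b ha hb p hp hq)
    · have hnd := pv_nodup_cycles n
      have := hnd.pairwise_of_forall_ne (fun a _ b _ h => h)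
      exact List.Pairwise.and_mem.mp (this.imp (fun h => h)) |>.imp (by tauto)

theorem pv_Lb_coords (n : Nat) (p : Nat × Nat) (hp : p ∈ pvLb n) : p.1 < n ∧ p.2 < n := by
  obtain ⟨c, hc, hpc⟩ := List.mem_flatMap.mp hp
  exact pv_cw_coords n c hc p hpc

theorem pv_mem_Lb (n : Nat) (x y : Nat) (hx : x < n) (hy : y < n)
    (hnc : ¬(x = y ∧ 2 * x + 1 = n)) : (x, y) ∈ pvLb n := by
  unfold pvLb
  rw [List.mem_flatMap]
  by_cases hA : x ≤ y ∧ x + y + 1 < n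
  · exact ⟨(x, y), (pv_mem_cycles n (x, y)).mpr (by simp; omega), by
      simp [pvCW, Prod.ext_iff]⟩
  by_cases hB : x < y ∧ n ≤ x + y + 1
  · exact ⟨(n - 1 - y, x), (pv_mem_cycles n (n - 1 - y, x)).mpr (by simp; omega), by
      simp [pvCW, Prod.ext_iff]; omega⟩
  by_cases hC : y ≤ x ∧ n < x + y + 1
  · exact ⟨(n - 1 - x, n - 1 - y), (pv_mem_cycles n (n - 1 - x, n - 1 - y)).mpr (by simp; omega), by
      simp [pvCW, Prod.ext_iff]; omega⟩
  · refine ⟨(y, n - 1 - x), (pv_mem_cycles n (y, n - 1 - x)).mpr (by simp; omega), by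
      simp [pvCW, Prod.ext_iff]; omega⟩

theorem pv_Lb_perm (n : Nat) :
    (pvPairs n).Perm (pvLb n ++ (pvPairs n).filter (fun p => !(decide (p ∈ pvLb n)))) := by
  have h0 := List.filter_append_perm (fun p => decide (p ∈ pvLb n)) (pvPairs n)
  refine (h0.symm).trans (List.Perm.append ?_ (List.Perm.refl _))
  apply List.perm_of_nodup_nodup_toFinset_eq ((pv_nodup_pairs n).filter _) (pv_nodup_Lb n)
  ext p
  simp only [List.mem_toFinset, List.mem_filter, decide_eq_true_eq, pv_mem_pairs]
  constructor
  · rintro ⟨_, h⟩; exact h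
  · intro h; exact ⟨pv_Lb_coords n p h, h⟩

-- commutation of the normalized writes (targets are distinct physical cells)
theorem pv_modify_modify_same {α : Type} [Inhabited α] (l : List α) (r : Nat) (f g : α → α) :
    (l.modify r f).modify r g = l.modify r (fun x => g (f x)) := by
  apply List.ext_getElem (by simp)
  intro t h1 h2
  simp only [List.getElem_modify]
  split_ifs <;> simp_all

theorem pv_comm (grid : List (List Int)) (i j K : Int)
    (hpre : Pre_apply_rotation_py grid i j K) :
    ∀ p ∈ pvPairs K.toNat, ∀ q ∈ pvPairs K.toNat, ∀ g,
      pvW grid i j K.toNat (pvW grid i j K.toNat g p) q = pvW grid i j K.toNat (pvW grid i j K.toNat g q) p := by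
  intro p hp q hq g
  by_cases hpq : p = q
  · rw [hpq]
  rw [pv_mem_pairs] at hp hq
  rcases hpre with hK | ⟨hi1, hi2, hi3, hcols⟩
  · exact absurd hp.1 (by omega)
  have hK : 0 < K := by omega
  by_cases hrow : pvRow grid i (K.toNat - 1 - p.2) = pvRow grid i (K.toNat - 1 - q.2)
  · -- same target row: then p.2 = q.2, p.1 ≠ q.1, columns differ
    have hy : p.2 = q.2 := by
      have := pv_row_inj grid i K hi1 hi2 hi3
        (K.toNat - 1 - p.2) (K.toNat - 1 - q.2) (by omega) (by omega) hrow
      omega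
    have hx : p.1 ≠ q.1 := fun h => hpq (Prod.ext h hy)
    have hcol := hcols (K.toNat - 1 - q.2) (by omega)
    rw [pv_len_bridge grid i (K.toNat - 1 - q.2) (by omega) (by omega)] at hcol
    have hcne : pvCol grid i j (K.toNat - 1 - q.2) p.1 ≠ pvCol grid i j (K.toNat - 1 - q.2) q.1 := fun h =>
      hx (pv_col_inj grid i j K (K.toNat - 1 - q.2) hcol.1 hcol.2.1 hcol.2.2 p.1 q.1 (by omega) (by omega) h)
    unfold pvW
    rw [hy, pv_modify_modify_same, pv_modify_modify_same]
    congr 1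
    funext row
    exact List.set_comm _ _ hcne
  · unfold pvW
    exact List.modify_modify_ne _ _ _ hrow

theorem pv_range_eq (K : Int) : PySem.List.pyRange 0 K 1 = List.map (fun k : Nat => (k : Int)) (List.range K.toNat) := by
  have h : ((K.toNat : Int)) = max K 0 := by omega
  rcases le_or_gt K 0 with hK | hK
  · rw [PySem.List.pyRange_of_pos 0 K Int.one_pos, if_neg (by omega)]
    have : K.toNat = 0 := by omega
    simp [this]
  · rw [PySem.List.pyRange_of_pos 0 K Int.one_pos, if_pos (by omega)]
    have h1 : (K - 0 + 1 - 1) / 1 = K := by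
      rw [Int.ediv_one]; ring
    rw [h1]
    exact List.map_congr_left (fun a _ => by ring)

theorem pv_range'_eq (a : Nat) (b : Int) :
    PySem.List.pyRange (a : Int) b 1 = List.map (fun k : Nat => (k : Int)) (List.range' a (b - a).toNat) := by
  rw [PySem.List.pyRange_one, List.range'_eq_map_range, List.map_map]
  exact List.map_congr_left (fun k _ => by simp)

theorem pv_copyA (grid : List (List Int)) :
    (PySem.List.pyRange 0 (grid.length : Int) 1).map
      (fun row => PySem.List.slice (PySem.List.pyGetD grid row []) none none) = grid := by
  simp only [PySem.List.slice_none_none]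
  simpa [PySem.List.len] using PySem.List.map_pyGetD_pyRange_zero grid []

theorem pv_copyB (grid : List (List Int)) :
    grid.map (fun row => PySem.List.slice row none none) = grid := by
  simp [PySem.List.slice_none_none]

theorem pv_A_norm (grid : List (List Int)) (i j K : Int)
    (hpre : Pre_apply_rotation_py grid i j K) :
    apply_rotation_py grid i j K = (pvPairs K.toNat).foldl (pvW grid i j K.toNat) grid := by
  simp only [apply_rotation_py, pv_copyA, pv_range_eq K, List.foldl_map]
  rw [pv_foldl_nested_dep]
  rcases le_or_gt K 0 with hK | hK
  · have h0 : K.toNat = 0 := by omega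
    simp [pvPairs, h0]
  rcases hpre with hK' | ⟨hi1, hi2, hi3, hcols⟩
  · omega
  apply pv_foldl_congr_inv (fun g => g.map List.length = grid.map List.length) _ _ _ _ rfl
  intro g p hp hg
  have hp' : p.1 < K.toNat ∧ p.2 < K.toNat := by
    have := List.mem_flatMap.mp hp
    obtain ⟨x, hx, hmap⟩ := this
    simp only [List.mem_map, List.mem_range] at hmap hx
    obtain ⟨y, hy, rfl⟩ := hmap
    exact ⟨hx, hy⟩
  constructor
  · have harg : i + K - 1 - ((p.2 : Nat) : Int) = i + ((K.toNat - 1 - p.2 : Nat) : Int) := by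
      omega
    rw [harg,
      pv_step grid i j K hi1 hi2 hcols g hg (K.toNat - 1 - p.2) p.1 (by omega) hp'.1 _,
      pv_read grid i j K hi1 hi2 hcols p.1 p.2 hp'.1 hp'.2]
    rfl
  · rw [pvW]; exact (pv_shape_modify g _ _ _).trans hg

-- one 4-cycle move of B equals the four normalized writes of that ring position
theorem pv_cycle (grid : List (List Int)) (i j K : Int)
    (hi1 : -(grid.length : Int) ≤ i) (hi2 : i + K ≤ (grid.length : Int))
    (hi3 : 0 ≤ i ∨ K ≤ (grid.length : Int))
    (hcols : ∀ x : Nat, x < K.toNat →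
        -(((PySem.List.pyGetD grid (i + (x : Int)) []).length : Int)) ≤ j ∧
          j + K ≤ ((PySem.List.pyGetD grid (i + (x : Int)) []).length : Int) ∧
          (0 ≤ j ∨ j + K ≤ 0 ∨ K ≤ ((PySem.List.pyGetD grid (i + (x : Int)) []).length : Int)))
    (hK : 0 < K)
    (g : List (List Int)) (hshape : g.map List.length = grid.map List.length)
    (l t : Nat) (hl : 2 * l + 1 < K.toNat) (ht1 : l ≤ t) (ht2 : t < K.toNat - 1 - l)
    (hag : ∀ p ∈ pvCW K.toNat (l, t),
        ((g.getD (pvRow grid i p.1) []).getD (pvCol grid i j p.1 p.2) 0) = pvVal grid i j p.1 p.2) :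
    pyRotCycle i j K g (l : Int) (t : Int) = (pvCW K.toNat (l, t)).foldl (pvW grid i j K.toNat) g := by
  have hn : ((K.toNat : Int)) = K := by omega
  set n := K.toNat with hndef
  have hla : (K - 1 - (l : Int)) = ((n - 1 - l : Nat) : Int) := by omega
  have htt : (K - 1 - (t : Int)) = ((n - 1 - t : Nat) : Int) := by omega
  set la := n - 1 - l with hladef
  set tt := n - 1 - t with httdef
  have hlan : la < n := by omega
  have httn : tt < n := by omega
  have hln : l < n := by omega
  have htn : t < n := by omega
  -- the four logical write pairs
  have hp1 : (t, la) ∈ pvCW n (l, t) := by simp [pvCW, hladef]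
  have hp2 : (la, tt) ∈ pvCW n (l, t) := by simp [pvCW, hladef, httdef]
  have hp3 : (tt, l) ∈ pvCW n (l, t) := by simp [pvCW, httdef]
  have hp4 : (l, t) ∈ pvCW n (l, t) := by simp [pvCW]
  have hagl := hag (l, t) hp4
  have hag1 := hag (t, la) hp1
  have hag2 := hag (la, tt) hp2
  have hag3 := hag (tt, l) hp3
  simp only [pyRotCycle]
  rw [hla, htt]
  -- tmp
  rw [pv_get2 grid i j K hi1 hi2 hcols g hshape l t hln htn, hagl]
  -- value 1 and write 1
  rw [pv_get2 grid i j K hi1 hi2 hcols g hshape t la htn hlan, hag1]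
  rw [pv_step grid i j K hi1 hi2 hcols g hshape l t hln htn _]
  set g1 := g.modify (pvRow grid i l) (fun row => row.set (pvCol grid i j l t) (pvVal grid i j t la)) with hg1
  have hsh1 : g1.map List.length = grid.map List.length := (pv_shape_modify g _ _ _).trans hshape
  -- value 2: cell (la, tt) untouched by write 1
  have hne1 : pvRow grid i la ≠ pvRow grid i l ∨ pvCol grid i j la tt ≠ pvCol grid i j l t :=
    pv_phys_ne grid i j K hi1 hi2 hi3 hcols la tt l t hlan httn hln htn (by
      intro h; have := congrArg Prod.fst h; simp at this; omega)
  rw [pv_get2 grid i j K hi1 hi2 hcols g1 hsh1 la tt hlan httn, hg1,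
    pv_get_modify_ne g _ _ _ _ _ hne1, hag2]
  rw [← hg1, pv_step grid i j K hi1 hi2 hcols g1 hsh1 t la htn hlan _]
  set g2 := g1.modify (pvRow grid i t) (fun row => row.set (pvCol grid i j t la) (pvVal grid i j la tt)) with hg2
  have hsh2 : g2.map List.length = grid.map List.length := (pv_shape_modify g1 _ _ _).trans hsh1
  -- value 3: cell (tt, l) untouched by writes 1 and 2
  have hne2 : pvRow grid i tt ≠ pvRow grid i t ∨ pvCol grid i j tt l ≠ pvCol grid i j t la :=
    pv_phys_ne grid i j K hi1 hi2 hi3 hcols tt l t la httn hln htn hlan (by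
      intro h
      have h1 := congrArg Prod.fst h
      have h2 := congrArg Prod.snd h
      simp at h1 h2; omega)
  have hne3 : pvRow grid i tt ≠ pvRow grid i l ∨ pvCol grid i j tt l ≠ pvCol grid i j l t :=
    pv_phys_ne grid i j K hi1 hi2 hi3 hcols tt l l t httn hln hln htn (by
      intro h; have := congrArg Prod.fst h; simp at this; omega)
  rw [pv_get2 grid i j K hi1 hi2 hcols g2 hsh2 tt l httn hln, hg2,
    pv_get_modify_ne g1 _ _ _ _ _ hne2, hg1, pv_get_modify_ne g _ _ _ _ _ hne3, hag3]
  rw [← hg1, ← hg2, pv_step grid i j K hi1 hi2 hcols g2 hsh2 la tt hlan httn _]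
  set g3 := g2.modify (pvRow grid i la) (fun row => row.set (pvCol grid i j la tt) (pvVal grid i j tt l)) with hg3
  have hsh3 : g3.map List.length = grid.map List.length := (pv_shape_modify g2 _ _ _).trans hsh2
  -- write 4
  rw [pv_step grid i j K hi1 hi2 hcols g3 hsh3 tt l httn hln _]
  -- now compare with the foldl of pvW
  simp only [pvCW, List.foldl_cons, List.foldl_nil]
  unfold pvW
  simp only []
  have e1 : n - 1 - la = l := by omega
  have e2 : n - 1 - tt = t := by omega
  have e3 : n - 1 - l = la := by omega
  have e4 : n - 1 - t = tt := by omega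
  rw [e1, e2, e3, e4]

-- B's nested loops, flattened over ring positions, are the normalized writes in cycle order
theorem pv_B_cycles (grid : List (List Int)) (i j K : Int)
    (hi1 : -(grid.length : Int) ≤ i) (hi2 : i + K ≤ (grid.length : Int))
    (hi3 : 0 ≤ i ∨ K ≤ (grid.length : Int))
    (hcols : ∀ x : Nat, x < K.toNat →
        -(((PySem.List.pyGetD grid (i + (x : Int)) []).length : Int)) ≤ j ∧
          j + K ≤ ((PySem.List.pyGetD grid (i + (x : Int)) []).length : Int) ∧
          (0 ≤ j ∨ j + K ≤ 0 ∨ K ≤ ((PySem.List.pyGetD grid (i + (x : Int)) []).length : Int)))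
    (hK : 0 < K) :
    ∀ (cs : List (Nat × Nat)) (g : List (List Int)),
      (∀ c ∈ cs, c ∈ pvCycles K.toNat) → cs.Nodup →
      g.map List.length = grid.map List.length →
      (∀ c ∈ cs, ∀ p ∈ pvCW K.toNat c,
          ((g.getD (pvRow grid i p.1) []).getD (pvCol grid i j p.1 p.2) 0) = pvVal grid i j p.1 p.2) →
      cs.foldl (fun g c => pyRotCycle i j K g (c.1 : Int) (c.2 : Int)) g
        = (cs.flatMap (pvCW K.toNat)).foldl (pvW grid i j K.toNat) g := by
  intro cs
  induction cs with
  | nil => intro g _ _ _ _; rfl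
  | cons c rest ih =>
    intro g hmem hnd hsh hag
    have hc := hmem c (by simp)
    have hc' := (pv_mem_cycles K.toNat c).mp hc
    obtain ⟨l, t⟩ := c
    simp only [List.foldl_cons, List.flatMap_cons, List.foldl_append]
    rw [pv_cycle grid i j K hi1 hi2 hi3 hcols hK g hsh l t hc'.1 hc'.2.1 hc'.2.2
      (hag (l, t) (by simp))]
    set g' := (pvCW K.toNat (l, t)).foldl (pvW grid i j K.toNat) g with hg'
    apply ih g' (fun c' hc' => hmem c' (by simp [hc'])) (List.Nodup.of_cons hnd)
      (pv_shape_foldW grid i j K.toNat _ g hsh)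
    -- agreement is preserved: the cells of later cycles are untouched
    intro c' hcr p hp
    have hcc' : (l, t) ≠ c' := by
      intro h; rw [← h] at hcr
      exact (List.nodup_cons.mp hnd).1 hcr
    have hc'mem := hmem c' (by simp [hcr])
    have hpn := pv_cw_coords K.toNat c' hc'mem p hp
    rw [hg', pv_foldl_untouched grid i j K.toNat _ g _ _ ?_]
    · exact hag c' (by simp [hcr]) p hp
    · intro q hq
      have hqd := pv_dest_mem_cw K.toNat (l, t) hc q hq
      have hqn := pv_cw_coords K.toNat (l, t) hc _ hqd
      have hne : p ≠ (K.toNat - 1 - q.2, q.1) := by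
        intro h
        rw [h] at hp
        exact hcc' (pv_cw_disjoint K.toNat (l, t) c' hc hc'mem _ hqd hp)
      have := pv_phys_ne grid i j K hi1 hi2 hi3 hcols
        (K.toNat - 1 - q.2) q.1 p.1 p.2 hqn.1 hqn.2 hpn.1 hpn.2 (fun h => hne (by rw [h]))
      tauto

theorem pv_B_norm (grid : List (List Int)) (i j K : Int)
    (hpre : Pre_apply_rotation_py grid i j K) :
    apply_rotation_py_alt grid i j K = (pvLb K.toNat).foldl (pvW grid i j K.toNat) grid := by
  rcases le_or_gt K 0 with hK | hK
  · have hf : PySem.Int.floordiv K 2 = K / 2 := PySem.Int.floordiv_eq_ediv_of_pos (by omega)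
    have h0 : K.toNat = 0 := by omega
    simp only [apply_rotation_py_alt, pv_copyB, hf]
    rw [PySem.List.pyRange_one_eq_nil (by omega)]
    simp [pvLb, pvCycles, h0]
  rcases hpre with hK' | ⟨hi1, hi2, hi3, hcols⟩
  · omega
  have hf : PySem.Int.floordiv K 2 = ((K.toNat / 2 : Nat) : Int) := by
    rw [PySem.Int.floordiv_eq_ediv_of_pos (by omega)]; omega
  simp only [apply_rotation_py_alt, pv_copyB, hf, pv_range_eq ((K.toNat / 2 : Nat) : Int),
    List.foldl_map, Int.toNat_natCast]
  have hinner : ∀ (g : List (List Int)) (l : Nat), l ∈ List.range (K.toNat / 2) →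
      (PySem.List.pyRange (l : Int) (K - 1 - (l : Int)) 1).foldl
          (fun g t => pyRotCycle i j K g (l : Int) t) g
        = (List.range' l (K.toNat - 1 - 2 * l)).foldl
          (fun (g : List (List Int)) (t : Nat) => pyRotCycle i j K g (l : Int) (t : Int)) g := by
    intro g l hl
    have hcnt : (K - 1 - (l : Int) - (l : Int)).toNat = K.toNat - 1 - 2 * l := by omega
    rw [pv_range'_eq l (K - 1 - (l : Int)), hcnt, List.foldl_map]
  rw [pv_foldl_congr_inv (fun _ => True) _ _ _ _ trivial
    (fun g l hl _ => ⟨hinner g l hl, trivial⟩)]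
  rw [pv_foldl_nested_dep (List.range (K.toNat / 2)) (fun l => List.range' l (K.toNat - 1 - 2 * l))
    (fun g x y => pyRotCycle i j K g (x : Int) (y : Int)) grid]
  exact pv_B_cycles grid i j K hi1 hi2 hi3 hcols hK (pvCycles K.toNat) grid
    (fun c hc => hc) (pv_nodup_cycles K.toNat) rfl
    (fun c _ p _ => rfl)

-- the lone fixed point of an odd window (its centre) is written with its own value: a no-op
theorem pv_fix_noop (grid : List (List Int)) (i j K : Int)
    (hi1 : -(grid.length : Int) ≤ i) (hi2 : i + K ≤ (grid.length : Int))
    (hi3 : 0 ≤ i ∨ K ≤ (grid.length : Int))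
    (hcols : ∀ x : Nat, x < K.toNat →
        -(((PySem.List.pyGetD grid (i + (x : Int)) []).length : Int)) ≤ j ∧
          j + K ≤ ((PySem.List.pyGetD grid (i + (x : Int)) []).length : Int) ∧
          (0 ≤ j ∨ j + K ≤ 0 ∨ K ≤ ((PySem.List.pyGetD grid (i + (x : Int)) []).length : Int)))
    (hK : 0 < K)
    (q : Nat × Nat) (hq : q ∈ pvPairs K.toNat) (hqn : q ∉ pvLb K.toNat) :
    pvW grid i j K.toNat ((pvLb K.toNat).foldl (pvW grid i j K.toNat) grid) q
      = (pvLb K.toNat).foldl (pvW grid i j K.toNat) grid := by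
  rw [pv_mem_pairs] at hq
  obtain ⟨a, b⟩ := q
  replace hq : a < K.toNat ∧ b < K.toNat := hq
  have hcent : a = b ∧ 2 * a + 1 = K.toNat := by
    by_contra h
    exact hqn (pv_mem_Lb K.toNat a b hq.1 hq.2 h)
  obtain ⟨hab, hctr⟩ := hcent
  subst hab
  set S := (pvLb K.toNat).foldl (pvW grid i j K.toNat) grid with hS
  have hshS : S.map List.length = grid.map List.length := pv_shape_foldW grid i j K.toNat _ grid rfl
  have he : K.toNat - 1 - a = a := by omega
  have hcell : ((S.getD (pvRow grid i a) []).getD (pvCol grid i j a a) 0)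
      = pvVal grid i j a a := by
    rw [hS, pv_foldl_untouched grid i j K.toNat _ grid _ _ ?_]
    · rfl
    · intro q' hq'
      obtain ⟨c', hc', hq'c⟩ := List.mem_flatMap.mp hq'
      have hd := pv_dest_mem_cw K.toNat c' hc' q' hq'c
      have hdn := pv_cw_coords K.toNat c' hc' _ hd
      have hne : (K.toNat - 1 - q'.2, q'.1) ≠ ((a, a) : Nat × Nat) := by
        intro h
        apply hqn
        rw [← h]
        exact List.mem_flatMap.mpr ⟨c', hc', hd⟩
      have := pv_phys_ne grid i j K hi1 hi2 hi3 hcols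
        (K.toNat - 1 - q'.2) q'.1 a a hdn.1 hdn.2 hq.1 hq.2 hne
      tauto
  have hRlt : pvRow grid i a < grid.length := pv_row_lt grid i a (by omega) (by omega)
  have hcol := hcols a hq.1
  rw [pv_len_bridge grid i a (by omega) (by omega)] at hcol
  have hclt : pvCol grid i j a a < pvLen grid i a :=
    pv_col_lt grid i j K a a (by omega) hcol.1 hcol.2.1
  have hrlen : (S.getD (pvRow grid i a) []).length = pvLen grid i a :=
    pv_shape_rowlen S grid hshS _ hRlt
  unfold pvW
  simp only [he]
  exact pv_modify_set_self S _ _ _ hcell (by omega)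

-- ===== VERDICT (by name: the statement is the Claim_ definition above) =====
theorem apply_rotation_py_spec : Claim_equal_apply_rotation_py := by
  intro grid i j K _hdom hpre
  unfold Spec_apply_rotation_py
  rw [pv_A_norm grid i j K hpre, pv_B_norm grid i j K hpre]
  rcases le_or_gt K 0 with hK | hK
  · have h0 : K.toNat = 0 := by omega
    simp [pvPairs, pvLb, pvCycles, h0]
  rcases hpre with hK' | ⟨hi1, hi2, hi3, hcols⟩
  · omega
  have hperm := pv_Lb_perm K.toNat
  rw [hperm.foldl_eq' (pv_comm grid i j K (Or.inr ⟨hi1, hi2, hi3, hcols⟩)) grid,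
    List.foldl_append]
  apply pv_foldl_id
  intro q hq
  have hq' := List.mem_filter.mp hq
  exact pv_fix_noop grid i j K hi1 hi2 hi3 hcols hK q hq'.1 (by simpa using hq'.2)
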